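-- pv_equiv track=rewrite | github.com/serrasqueiro/commitdate | commitdate.py | simpler_subdirs
-- ===== SOURCE A (Python) =====
-- def simpler_subdirs(dirs):
--     # Remove dirs that are sub-strings of others
--     rest = []
--     for idx, adir in enumerate(dirs):
--         is_sub = False
--         for this, searched in enumerate(dirs):
--             if idx == this:
--                 continue
--             if searched.startswith(adir):
--                 is_sub = True
--                 break
--         if is_sub:
--             continue
--         rest.append(adir)
--     return rest
-- ===== SOURCE B (Python) =====
-- def simpler_subdirs(dirs):
--     # Sort once; in sorted order every string that has d as a prefix sits
--     # immediately after d, so one adjacent-pair pass finds every dir that is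
--     # a prefix of some other dir (duplicates included); then filter in the
--     # original order.
--     ss = sorted(dirs)
--     removed = set()
--     for a, b in zip(ss, ss[1:]):
--         if b.startswith(a):
--             removed.add(a)
--     return [d for d in dirs if d not in removed]
-- ===== Notes on version B (the rewrite author's own statement) =====
-- stated objective: faster
-- what changed: Replaces the quadratic all-pairs startswith scan by one sort followed by a single adjacent-pair pass (in sorted order any string extending d is adjacent to d's block), collecting prefix dirs in a set and filtering in original order.
import Mathlib
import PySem

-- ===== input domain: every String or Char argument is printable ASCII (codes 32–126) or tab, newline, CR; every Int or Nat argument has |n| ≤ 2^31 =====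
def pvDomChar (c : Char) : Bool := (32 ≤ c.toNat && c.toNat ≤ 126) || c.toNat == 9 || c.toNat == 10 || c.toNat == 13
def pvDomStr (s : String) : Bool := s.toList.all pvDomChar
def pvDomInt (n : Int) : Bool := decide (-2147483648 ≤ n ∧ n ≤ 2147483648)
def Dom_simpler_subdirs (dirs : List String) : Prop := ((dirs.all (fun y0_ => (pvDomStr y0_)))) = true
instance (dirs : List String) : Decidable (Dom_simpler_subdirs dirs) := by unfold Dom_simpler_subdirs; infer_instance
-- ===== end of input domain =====

-- B replaces A's quadratic all-pairs startswith scan by sort + one adjacent-pair pass (faster, asymptotic).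


-- ===== PORT A =====
-- A: for each (idx, adir), scan all (this, searched) and drop adir as soon as some
-- other entry starts with it (the for/break flag is the `any` over the enumerate).
def simpler_subdirs (dirs : List String) : List String :=
  (PySem.List.enumerate dirs 0).foldl
    (fun rest p =>
      let is_sub := (PySem.List.enumerate dirs 0).any
        (fun q => q.1 != p.1 && PySem.Str.startswith q.2 p.2)
      if is_sub then rest else rest ++ [p.2])
    []

-- ===== PORT B =====
-- B: ss = sorted(dirs); one pass over adjacent pairs collects into a set every dir some
-- other dir starts with; then filter dirs in original order.
def simpler_subdirs_alt (dirs : List String) : List String :=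
  let ss := PySem.List.sorted dirs (fun x => x) false
  let removed : PySem.Set String :=
    (ss.zip ss.tail).foldl
      (fun r p => if PySem.Str.startswith p.2 p.1 then PySem.Set.add r p.1 else r)
      PySem.Set.empty
  dirs.filter (fun d => !(PySem.Set.contains removed d))

-- ===== PRECONDITION & SPEC =====
def Spec_simpler_subdirs (dirs : List String) (out : List String) : Prop := out = simpler_subdirs_alt dirs
instance (dirs : List String) (out : List String) : Decidable (Spec_simpler_subdirs dirs out) := by unfold Spec_simpler_subdirs; infer_instance

-- ===== CLAIM (what is proved, stated in full; the proofs are below) =====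
def Claim_equal_simpler_subdirs : Prop := ∀ (dirs : List String), Dom_simpler_subdirs dirs → Spec_simpler_subdirs dirs (simpler_subdirs dirs)

-- ===== LEMMAS AND PROOFS =====

-- `cnt dirs d` = how many entries of `dirs` start with `d` (d itself included wherever it occurs).
def pvCnt (dirs : List String) (d : String) : Nat :=
  dirs.countP (fun s => PySem.Str.startswith s d)

theorem pv_sw_refl (d : String) : PySem.Str.startswith d d = true := by
  rw [PySem.Str.startswith_eq, PySem.Chars.startswith_iff]

-- a prefix is ≤ in Python's (lexicographic) string order, list level
theorem pv_prefix_not_lt (d s : List Char) (h : d <+: s) : ¬ s < d := by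
  induction d generalizing s with
  | nil => exact List.not_lt_nil s
  | cons c d' ih =>
    obtain ⟨t, rfl⟩ := h
    intro hlt
    cases hlt with
    | cons h => exact ih (d' ++ t) ⟨t, rfl⟩ h
    | rel h => exact lt_irrefl _ h

-- strings between a prefix d and an extension s of d also extend d, list level
theorem pv_between_list (d t s : List Char) (hp : d <+: s) (h1 : ¬ t < d) (h2 : ¬ s < t) :
    d <+: t := by
  induction d generalizing t s with
  | nil => exact List.nil_prefix
  | cons c d' ih =>
    obtain ⟨r, rfl⟩ := hp
    cases t with
    | nil => exact absurd List.Lex.nil h1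
    | cons a t' =>
      rcases lt_trichotomy a c with hac | hac | hac
      · exact absurd (List.Lex.rel hac) h1
      · subst hac
        have h1' : ¬ t' < d' := fun hl => h1 (List.Lex.cons hl)
        have h2' : ¬ (d' ++ r) < t' := fun hl => h2 (List.Lex.cons hl)
        obtain ⟨u, hu⟩ := ih t' (d' ++ r) ⟨r, rfl⟩ h1' h2'
        exact ⟨u, by rw [List.cons_append, hu]⟩
      · exact absurd (List.Lex.rel hac) h2

theorem pv_sw_le {d s : String} (h : PySem.Str.startswith s d = true) : d ≤ s := by
  rw [PySem.Str.startswith_eq, PySem.Chars.startswith_iff] at h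
  rw [String.le_iff_toList_le, le_iff_lt_or_eq]
  rcases eq_or_ne d.toList s.toList with he | hne
  · exact Or.inr he
  · rcases lt_or_gt_of_ne hne with hl | hg
    · exact Or.inl hl
    · exact absurd hg (pv_prefix_not_lt _ _ h)

theorem pv_sw_between {d t s : String} (hds : PySem.Str.startswith s d = true)
    (h1 : d ≤ t) (h2 : t ≤ s) : PySem.Str.startswith t d = true := by
  rw [PySem.Str.startswith_eq, PySem.Chars.startswith_iff] at hds ⊢
  rw [String.le_iff_toList_le] at h1 h2
  exact pv_between_list _ _ _ hds (not_lt.mpr h1) (not_lt.mpr h2)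

-- two distinct positions satisfying p give countP ≥ 2
theorem pv_two_pos {α : Type} (l : List α) (p : α → Bool) {i j : Nat} (hij : i < j)
    (hj : j < l.length) (hpi : p (l[i]'(lt_trans hij hj)) = true) (hpj : p l[j] = true) :
    2 ≤ l.countP p := by
  have hsplit : l = l.take j ++ l.drop j := (List.take_append_drop j l).symm
  have hdrop : l.drop j = l[j] :: l.drop (j + 1) := List.drop_eq_getElem_cons hj
  have hmem : l[i]'(lt_trans hij hj) ∈ l.take j := by
    rw [List.mem_iff_getElem]
    exact ⟨i, by simp [List.length_take]; omega, by rw [List.getElem_take]⟩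
  have h1 : 1 ≤ (l.take j).countP p := by
    rw [Nat.one_le_iff_ne_zero]
    intro h0
    have := List.countP_eq_zero.mp h0 _ hmem
    simp [hpi] at this
  have h2 : 1 ≤ (l.drop j).countP p := by
    rw [hdrop, List.countP_cons_of_pos (p := p) hpj]
    omega
  calc 2 ≤ (l.take j).countP p + (l.drop j).countP p := by omega
    _ = l.countP p := by rw [← List.countP_append, ← hsplit]

-- if p fails at every position other than i then countP ≤ 1
theorem pv_le_one {α : Type} (l : List α) (p : α → Bool) (i : Nat)
    (h : ∀ j (hj : j < l.length), j ≠ i → p l[j] = false) : l.countP p ≤ 1 := by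
  have hsplit : l.countP p = (l.take i).countP p + (l.drop i).countP p := by
    rw [← List.countP_append, List.take_append_drop]
  have htake : (l.take i).countP p = 0 := by
    rw [List.countP_eq_zero]
    intro a ha
    obtain ⟨j, hj, rfl⟩ := List.mem_iff_getElem.mp ha
    have hji : j < i := by simp only [List.length_take] at hj; omega
    have hjlen : j < l.length := by simp only [List.length_take] at hj; omega
    rw [List.getElem_take]
    simp [h j hjlen (Nat.ne_of_lt hji)]
  by_cases hi : i < l.length
  · have hdrop1 : (l.drop (i + 1)).countP p = 0 := by
      rw [List.countP_eq_zero]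
      intro a ha
      obtain ⟨j, hj, rfl⟩ := List.mem_iff_getElem.mp ha
      have hjlen : i + 1 + j < l.length := by simp only [List.length_drop] at hj; omega
      rw [List.getElem_drop]
      simp [h _ hjlen (by omega)]
    have hdropc : l.drop i = l[i] :: l.drop (i + 1) := List.drop_eq_getElem_cons hi
    have hle : (l.drop i).countP p ≤ 1 := by
      rw [hdropc, List.countP_cons, hdrop1]
      split <;> omega
    omega
  · have hnil : l.drop i = [] := List.drop_eq_nil_of_le (by omega)
    rw [hsplit, htake, hnil]
    simp

-- A's outer loop is an append-if fold: characterize it as filter + map over the enumerate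
theorem pv_foldA (P : Int × String → Bool) (l : List (Int × String)) (acc : List String) :
    l.foldl (fun rest p => if P p then rest else rest ++ [p.2]) acc
      = acc ++ (l.filter (fun p => !P p)).map (·.2) := by
  induction l generalizing acc with
  | nil => simp
  | cons x xs ih =>
    by_cases hx : P x <;> simp [List.foldl_cons, hx, ih]

-- pushing an index-aware Boolean filter over enumerate down to a value filter
theorem pv_enumFilter (l : List String) (f : Int × String → Bool) (g : String → Bool) (s : Int)
    (h : ∀ k (hk : k < l.length), f (s + (k : Int), l[k]) = g l[k]) :
    ((PySem.List.enumerate l s).filter f).map (·.2) = l.filter g := by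
  induction l generalizing s with
  | nil => simp [PySem.List.enumerate_nil]
  | cons x xs ih =>
    have h0 : f (s, x) = g x := by simpa using h 0 (by simp)
    have hrest : ((PySem.List.enumerate xs (s + 1)).filter f).map (·.2) = xs.filter g := by
      apply ih
      intro k hk
      have := h (k + 1) (by simpa using Nat.succ_lt_succ hk)
      simpa [add_assoc, add_comm, add_left_comm] using this
    rw [PySem.List.enumerate_cons, List.filter_cons]
    by_cases hgx : g x
    · rw [if_pos (by simp [h0, hgx])]
      simp [hgx, hrest]
    · rw [if_neg (by simp [h0, hgx])]
      simp [hgx, hrest]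

-- the inner any-condition at position i, as a value condition on dirs[i]
theorem pv_exists_ne_iff_two (l : List String) (i : Nat) (hi : i < l.length) :
    (∃ j, ∃ hj : j < l.length, j ≠ i ∧ PySem.Str.startswith l[j] l[i] = true)
      ↔ 2 ≤ pvCnt l l[i] := by
  constructor
  · rintro ⟨j, hj, hne, hsw⟩
    rcases Nat.lt_or_ge j i with hji | hij
    · exact pv_two_pos l _ hji hi hsw (pv_sw_refl _)
    · have hij' : i < j := lt_of_le_of_ne hij (Ne.symm hne)
      exact pv_two_pos l _ hij' hj (pv_sw_refl _) hsw
  · intro h2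
    by_contra hno
    push Not at hno
    have : pvCnt l l[i] ≤ 1 := by
      apply pv_le_one
      intro j hj hji
      have := hno j hj hji
      simpa using this
    omega

-- A equals the count-based filter
theorem pv_A_char (dirs : List String) :
    simpler_subdirs dirs = dirs.filter (fun d => !decide (2 ≤ pvCnt dirs d)) := by
  unfold simpler_subdirs
  rw [pv_foldA, List.nil_append]
  apply pv_enumFilter
  intro k hk
  congr 1
  rw [Bool.eq_iff_iff, List.any_eq_true, decide_eq_true_iff]
  constructor
  · rintro ⟨q, hq, hcond⟩
    rw [PySem.List.mem_enumerate_iff] at hq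
    obtain ⟨j, hj, rfl⟩ := hq
    simp only [Bool.and_eq_true, bne_iff_ne] at hcond
    refine (pv_exists_ne_iff_two dirs k hk).mp ⟨j, hj, ?_, hcond.2⟩
    intro hjk; exact hcond.1 (by simp [hjk])
  · intro h2
    obtain ⟨j, hj, hne, hsw⟩ := (pv_exists_ne_iff_two dirs k hk).mpr h2
    refine ⟨((j : Int), dirs[j]), ?_, ?_⟩
    · rw [PySem.List.mem_enumerate_iff]
      exact ⟨j, hj, by simp⟩
    · simp only [Bool.and_eq_true, bne_iff_ne]
      exact ⟨by simpa using fun h => hne (by exact_mod_cast h), hsw⟩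

-- membership in B's conditional fold-into-a-set
theorem pv_foldB (c : String × String → Bool) (l : List (String × String))
    (acc : PySem.Set String) (y : String) :
    (y ∈ l.foldl (fun r p => if c p then PySem.Set.add r p.1 else r) acc)
      ↔ y ∈ acc ∨ ∃ p ∈ l, c p = true ∧ p.1 = y := by
  induction l generalizing acc with
  | nil => simp
  | cons x xs ih =>
    rw [List.foldl_cons]
    by_cases hx : c x
    · rw [if_pos hx, ih, PySem.Set.mem_add]
      constructor
      · rintro (⟨h | h⟩ | ⟨p, hp, hc, hy⟩)
        · exact Or.inl h
        · exact Or.inr ⟨x, by simp, hx, h.symm⟩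
        · exact Or.inr ⟨p, by simp [hp], hc, hy⟩
      · rintro (h | ⟨p, hp, hc, hy⟩)
        · exact Or.inl (Or.inl h)
        · rcases List.mem_cons.mp hp with rfl | hp'
          · exact Or.inl (Or.inr hy.symm)
          · exact Or.inr ⟨p, hp', hc, hy⟩
    · rw [if_neg hx, ih]
      constructor
      · rintro (h | ⟨p, hp, hc, hy⟩)
        · exact Or.inl h
        · exact Or.inr ⟨p, by simp [hp], hc, hy⟩
      · rintro (h | ⟨p, hp, hc, hy⟩)
        · exact Or.inl h
        · rcases List.mem_cons.mp hp with rfl | hp'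
          · exact absurd hc hx
          · exact Or.inr ⟨p, hp', hc, hy⟩

-- pairs of the zip with the tail are exactly the adjacent pairs
theorem pv_mem_zip_tail {α : Type} (ss : List α) (p : α × α) :
    p ∈ ss.zip ss.tail ↔ ∃ i, ∃ h : i + 1 < ss.length, p = (ss[i], ss[i + 1]) := by
  rw [List.mem_iff_getElem]
  constructor
  · rintro ⟨i, hi, rfl⟩
    have hlen : i + 1 < ss.length := by
      simp [List.length_zip, List.length_tail] at hi; omega
    refine ⟨i, hlen, ?_⟩
    rw [List.getElem_zip, List.getElem_tail]
  · rintro ⟨i, hi, rfl⟩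
    refine ⟨i, by simp [List.length_zip, List.length_tail]; omega, ?_⟩
    rw [List.getElem_zip, List.getElem_tail]

-- value d (present in dirs) sits in B's removed-set iff ≥ 2 entries start with d
theorem pv_B_char (dirs : List String) (d : String) (hd : d ∈ dirs) :
    (∃ i, ∃ h : i + 1 < (PySem.List.sorted dirs (fun x => x) false).length,
        (PySem.List.sorted dirs (fun x => x) false)[i] = d ∧
        PySem.Str.startswith ((PySem.List.sorted dirs (fun x => x) false)[i + 1]) d = true)
      ↔ 2 ≤ pvCnt dirs d := by
  set ss := PySem.List.sorted dirs (fun x => x) false with hss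
  have hcnt : pvCnt dirs d = ss.countP (fun s => PySem.Str.startswith s d) := by
    unfold pvCnt
    exact (List.Perm.countP_eq _ (PySem.List.sorted_perm dirs (fun x => x) false)).symm
  constructor
  · rintro ⟨i, hi, hseq, hsw⟩
    rw [hcnt]
    exact pv_two_pos ss _ (Nat.lt_succ_self i) hi (by rw [hseq]; exact pv_sw_refl d) hsw
  · intro h2
    have hdss : d ∈ ss := (PySem.List.mem_sorted dirs (fun x => x) false d).mpr hd
    -- i0: first position whose entry starts with d
    set p : String → Bool := fun s => PySem.Str.startswith s d with hp
    set i0 := ss.findIdx p with hi0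
    have hi0lt : i0 < ss.length :=
      List.findIdx_lt_length.mpr ⟨d, hdss, pv_sw_refl d⟩
    have hpi0 : p (ss[i0]) = true := List.findIdx_getElem (w := hi0lt)
    -- d occurs at some position jd; minimality forces i0 ≤ jd, so ss[i0] ≤ d; with d ≤ ss[i0]: equal
    obtain ⟨jd, hjd, hjdeq⟩ := List.mem_iff_getElem.mp hdss
    have hi0jd : i0 ≤ jd := by
      by_contra hgt
      push Not at hgt
      have hf : p ss[jd] = false := List.not_of_lt_findIdx (p := p) (xs := ss) hgt
      rw [hjdeq, hp] at hf
      simp only [] at hf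
      rw [pv_sw_refl d] at hf
      exact Bool.noConfusion hf
    have heq : ss[i0] = d := by
      have hle : ss[i0] ≤ ss[jd] := PySem.List.sorted_id_getElem_mono dirs hi0jd (by rw [← hss]; exact hjd)
      rw [hjdeq] at hle
      exact le_antisymm hle (pv_sw_le hpi0)
    -- a second position j ≠ i0 with p
    have hex : ∃ j, ∃ hj : j < ss.length, j ≠ i0 ∧ p ss[j] = true := by
      by_contra hno
      push Not at hno
      have : ss.countP p ≤ 1 := by
        apply pv_le_one
        intro j hj hji
        have := hno j hj hji
        simpa using this
      rw [hcnt] at h2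
      omega
    obtain ⟨j, hj, hne, hpj⟩ := hex
    have hi0j : i0 < j := by
      rcases Nat.lt_or_ge i0 j with h | h
      · exact h
      · exfalso
        have h' : j < i0 := lt_of_le_of_ne h hne
        have hf : p ss[j] = false := List.not_of_lt_findIdx (p := p) (xs := ss) h'
        rw [hpj] at hf
        exact Bool.noConfusion hf
    have hi1 : i0 + 1 < ss.length := by omega
    refine ⟨i0, hi1, heq, ?_⟩
    have hle1 : d ≤ ss[i0 + 1] := by
      rw [← heq]
      exact PySem.List.sorted_id_getElem_mono dirs (Nat.le_succ i0) (by rw [← hss]; exact hi1)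
    have hle2 : ss[i0 + 1] ≤ ss[j] :=
      PySem.List.sorted_id_getElem_mono dirs (by omega) (by rw [← hss]; exact hj)
    exact pv_sw_between hpj hle1 hle2

-- B equals the count-based filter
theorem pv_B_eq (dirs : List String) :
    simpler_subdirs_alt dirs = dirs.filter (fun d => !decide (2 ≤ pvCnt dirs d)) := by
  unfold simpler_subdirs_alt
  apply List.filter_congr
  intro d hd
  congr 1
  rw [Bool.eq_iff_iff, PySem.Set.contains_iff, decide_eq_true_iff]
  rw [pv_foldB]
  simp only [PySem.Set.empty, List.not_mem_nil, false_or]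
  rw [← pv_B_char dirs d hd]
  constructor
  · rintro ⟨p, hp, hc, hy⟩
    obtain ⟨i, hi, rfl⟩ := (pv_mem_zip_tail _ p).mp hp
    refine ⟨i, hi, hy, ?_⟩
    simpa [← hy] using hc
  · rintro ⟨i, hi, hseq, hsw⟩
    refine ⟨((PySem.List.sorted dirs (fun x => x) false)[i],
            (PySem.List.sorted dirs (fun x => x) false)[i + 1]),
           (pv_mem_zip_tail _ _).mpr ⟨i, hi, rfl⟩, ?_, hseq⟩
    simpa [hseq] using hsw

-- ===== VERDICT (by name: the statement is the Claim_ definition above) =====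
theorem simpler_subdirs_spec : Claim_equal_simpler_subdirs := by
  intro dirs _
  unfold Spec_simpler_subdirs
  rw [pv_A_char, pv_B_eq]
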